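-- pv_equiv track=rewrite | github.com/pypi-data/pypi-mirror-245 | packages/void-terminal/void_terminal-0.0.12-py3-none-any.whl/void_terminal/toolbox.py | text_divide_paragraph
-- ===== SOURCE A (Python) =====
-- def text_divide_paragraph(text):
--     """
--     Split the text into paragraphs according to the paragraph separator, Generate HTML code with paragraph tags.
--     """
--     pre = '<div class="markdown-body">'
--     suf = '</div>'
--     if text.startswith(pre) and text.endswith(suf):
--         return text
--
--     if '```' in text:
--         # careful input
--         return text
--     elif '</div>' in text:
--         # careful input
--         return text
--     else:
--         # whatever input
--         lines = text.split("\n")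
--         for i, line in enumerate(lines):
--             lines[i] = lines[i].replace(" ", "&nbsp;")
--         text = "</br>".join(lines)
--         return pre + text + suf
-- ===== SOURCE B (Python) =====
-- def text_divide_paragraph(text):
--     """
--     Split the text into paragraphs according to the paragraph separator, Generate HTML code with paragraph tags.
--     """
--     pre = '<div class="markdown-body">'
--     suf = '</div>'
--     if text.startswith(pre) and text.endswith(suf):
--         return text
--
--     if '```' in text:
--         # careful input
--         return text
--     elif '</div>' in text:
--         # careful input
--         return text
--     else:
--         # whatever input: one character-level pass with an accumulator,
--         # emitting the HTML escape for each character as it is seen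
--         out = []
--         for ch in text:
--             if ch == "\n":
--                 out.append("</br>")
--             elif ch == " ":
--                 out.append("&nbsp;")
--             else:
--                 out.append(ch)
--         return pre + "".join(out) + suf
-- ===== Notes on version B (the rewrite author's own statement) =====
-- stated objective: alternative
-- what changed: The staged split-on-newlines / per-line space-replacing loop / join-with-break-tags passes are replaced by a single character-level pass with an accumulator that emits each character's HTML escape (break tag for a newline, non-breaking-space entity for a space, the character otherwise) and joins once at the end.
import Mathlib
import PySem

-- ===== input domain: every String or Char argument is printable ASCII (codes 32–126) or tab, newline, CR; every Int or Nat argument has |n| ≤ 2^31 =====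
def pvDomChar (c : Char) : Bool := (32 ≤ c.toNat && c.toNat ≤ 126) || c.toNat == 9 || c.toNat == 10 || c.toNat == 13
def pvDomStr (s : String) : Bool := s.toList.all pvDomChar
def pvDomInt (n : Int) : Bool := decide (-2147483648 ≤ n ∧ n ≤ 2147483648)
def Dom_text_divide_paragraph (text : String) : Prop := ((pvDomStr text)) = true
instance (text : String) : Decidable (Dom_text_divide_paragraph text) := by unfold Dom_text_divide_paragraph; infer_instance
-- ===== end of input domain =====

-- B replaces A's staged split/per-line-loop/join by ONE character-level pass with an
-- accumulator, emitting each character's HTML escape as it is seen (alternative; same cost).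

-- ===== PORT A =====
def text_divide_paragraph (text : String) : String :=
  let pre := "<div class=\"markdown-body\">"
  let suf := "</div>"
  if PySem.Str.startswith text pre && PySem.Str.endswith text suf then text
  else if PySem.Str.isIn "```" text then text
  else if PySem.Str.isIn "</div>" text then text
  else
    -- lines = text.split("\n"); for i: lines[i] = lines[i].replace(" ", "&nbsp;"); "</br>".join(lines)
    let lines := PySem.Chars.splitOn text.toList "\n".toList
    let lines := lines.map (fun l => PySem.Chars.replace l " ".toList "&nbsp;".toList)
    let body := PySem.Chars.join "</br>".toList lines
    String.ofList (pre.toList ++ body ++ suf.toList)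

-- ===== PORT B =====
def text_divide_paragraph_alt (text : String) : String :=
  let pre := "<div class=\"markdown-body\">"
  let suf := "</div>"
  if PySem.Str.startswith text pre && PySem.Str.endswith text suf then text
  else if PySem.Str.isIn "```" text then text
  else if PySem.Str.isIn "</div>" text then text
  else
    -- out = []; for ch in text: out.append(escape of ch); "".join(out)
    let out : List (List Char) :=
      text.toList.foldl (fun acc ch =>
        if ch = '\n' then acc ++ ["</br>".toList]
        else if ch = ' ' then acc ++ ["&nbsp;".toList]
        else acc ++ [[ch]]) []
    let body := PySem.Chars.join [] out
    String.ofList (pre.toList ++ body ++ suf.toList)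

-- ===== PRECONDITION & SPEC =====
def Spec_text_divide_paragraph (text : String) (out : String) : Prop := out = text_divide_paragraph_alt text
instance (text : String) (out : String) : Decidable (Spec_text_divide_paragraph text out) := by unfold Spec_text_divide_paragraph; infer_instance

-- ===== CLAIM (what is proved, stated in full; the proofs are below) =====
def Claim_equal_text_divide_paragraph : Prop := ∀ (text : String), Dom_text_divide_paragraph text → Spec_text_divide_paragraph text (text_divide_paragraph text)

-- ===== LEMMAS AND PROOFS =====

-- the per-character escape B maintains
def pvEsc (c : Char) : List Char :=
  if c = '\n' then "</br>".toList else if c = ' ' then "&nbsp;".toList else [c]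

-- single-char replace is a flatMap
theorem replace_go_single (a : Char) (r : List Char) :
    ∀ (l : List Char) (fuel : Nat) (acc : List Char), l.length ≤ fuel →
      PySem.Chars.replace.go [a] r fuel l acc
        = acc.reverse ++ l.flatMap (fun c => if c = a then r else [c]) := by
  intro l
  induction l with
  | nil =>
    intro fuel acc _
    cases fuel <;> simp [PySem.Chars.replace.go]
  | cons c t ih =>
    intro fuel acc h
    cases fuel with
    | zero => simp at h
    | succ f =>
      simp only [PySem.Chars.replace.go]
      by_cases hc : c = a
      · subst hc
        have hp : [c].isPrefixOf (c :: t) = true := by simp [List.isPrefixOf]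
        simp only [hp, if_true]
        rw [show List.drop [c].length (c :: t) = t by simp]
        rw [ih f (r.reverse ++ acc) (by simp at h; omega)]
        simp
      · have hp : [a].isPrefixOf (c :: t) = false := by
          simp [List.isPrefixOf, Ne.symm hc]
        simp only [hp, Bool.false_eq_true, if_false]
        rw [ih f (c :: acc) (by simp at h ⊢; omega)]
        simp [hc]

theorem replace_single (a : Char) (r : List Char) (l : List Char) :
    PySem.Chars.replace l [a] r = l.flatMap (fun c => if c = a then r else [c]) := by
  simp only [PySem.Chars.replace]
  rw [if_neg (by simp)]
  simpa using replace_go_single a r l l.length [] (le_refl _)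

-- structural description of single-char split: first piece and the remaining pieces
def spl (a : Char) : List Char → List Char × List (List Char)
  | [] => ([], [])
  | c :: t =>
    let p := spl a t
    if c = a then ([], p.1 :: p.2) else (c :: p.1, p.2)

theorem spl_cons (a c : Char) (t : List Char) :
    spl a (c :: t)
      = if c = a then ([], (spl a t).1 :: (spl a t).2)
        else (c :: (spl a t).1, (spl a t).2) := by
  simp [spl]

theorem splitOn_go_single (a : Char) :
    ∀ (l : List Char) (fuel : Nat) (cur : List Char) (acc : List (List Char)), l.length ≤ fuel →
      PySem.Chars.splitOn.go [a] fuel l cur acc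
        = acc.reverse ++ (cur.reverse ++ (spl a l).1) :: (spl a l).2 := by
  intro l
  induction l with
  | nil =>
    intro fuel cur acc _
    cases fuel <;> simp [PySem.Chars.splitOn.go, spl]
  | cons c t ih =>
    intro fuel cur acc h
    cases fuel with
    | zero => simp at h
    | succ f =>
      simp only [PySem.Chars.splitOn.go]
      by_cases hc : c = a
      · subst hc
        have hp : [c].isPrefixOf (c :: t) = true := by simp [List.isPrefixOf]
        simp only [hp, if_true]
        rw [show List.drop [c].length (c :: t) = t by simp]
        rw [ih f [] (cur.reverse :: acc) (by simp at h; omega)]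
        rw [spl_cons, if_pos rfl]
        simp
      · have hp : [a].isPrefixOf (c :: t) = false := by
          simp [List.isPrefixOf, Ne.symm hc]
        simp only [hp, Bool.false_eq_true, if_false]
        rw [ih f (c :: cur) acc (by simp at h ⊢; omega)]
        rw [spl_cons, if_neg hc]
        simp

theorem splitOn_single (a : Char) (l : List Char) :
    PySem.Chars.splitOn l [a] = (spl a l).1 :: (spl a l).2 := by
  simp only [PySem.Chars.splitOn]
  simpa using splitOn_go_single a l (l.length + 1) [] [] (by omega)

theorem join_head_append (sep x y : List Char) (ys : List (List Char)) :
    PySem.Chars.join sep ((x ++ y) :: ys) = x ++ PySem.Chars.join sep (y :: ys) := by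
  cases ys with
  | nil => simp [PySem.Chars.join, List.intercalate]
  | cons z zs => simp [PySem.Chars.join, List.intercalate]

theorem join_cons_cons' (sep x y : List Char) (ys : List (List Char)) :
    PySem.Chars.join sep (x :: y :: ys) = x ++ sep ++ PySem.Chars.join sep (y :: ys) := by
  simp [PySem.Chars.join, List.intercalate]

-- A's split/replace/join on single-char separators collapses to one per-character flatMap
theorem join_spl (a : Char) (br : List Char) (f : Char → List Char) :
    ∀ l : List Char,
      PySem.Chars.join br (((spl a l).1 :: (spl a l).2).map (fun p => p.flatMap f))
        = l.flatMap (fun c => if c = a then br else f c) := by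
  intro l
  induction l with
  | nil => simp [spl, PySem.Chars.join, List.intercalate]
  | cons c t ih =>
    rw [spl_cons]
    by_cases hc : c = a
    · rw [if_pos hc]
      simp only [List.map_cons, List.flatMap_nil]
      rw [join_cons_cons']
      simp only [List.map_cons] at ih
      rw [ih]
      simp [hc]
    · rw [if_neg hc]
      simp only [List.map_cons, List.flatMap_cons]
      rw [join_head_append]
      simp only [List.map_cons] at ih
      rw [ih]
      simp [hc]

-- A's else-branch body equals the flatMap of pvEsc
theorem a_body_eq (l : List Char) :
    PySem.Chars.join "</br>".toList
        ((PySem.Chars.splitOn l "\n".toList).map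
          (fun p => PySem.Chars.replace p " ".toList "&nbsp;".toList))
      = l.flatMap pvEsc := by
  have hsp : (" ".toList : List Char) = [' '] := rfl
  have hnl : ("\n".toList : List Char) = ['\n'] := rfl
  rw [hsp, hnl, splitOn_single]
  have hm : ((spl '\n' l).1 :: (spl '\n' l).2).map
        (fun p => PySem.Chars.replace p [' '] "&nbsp;".toList)
      = ((spl '\n' l).1 :: (spl '\n' l).2).map
        (fun p => p.flatMap (fun c => if c = ' ' then "&nbsp;".toList else [c])) := by
    apply List.map_congr_left; intro p _; exact replace_single ' ' _ p
  rw [hm, join_spl]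
  rfl

theorem join_nil_sep (xs : List (List Char)) : PySem.Chars.join [] xs = xs.flatten := by
  induction xs with
  | nil => simp [PySem.Chars.join, List.intercalate]
  | cons x t ih =>
    cases t with
    | nil => simp [PySem.Chars.join, List.intercalate]
    | cons y ys =>
      rw [join_cons_cons', ih]
      simp

-- B's else-branch body equals the same flatMap
theorem b_body_eq (l : List Char) :
    PySem.Chars.join []
        (l.foldl (fun acc ch =>
          if ch = '\n' then acc ++ ["</br>".toList]
          else if ch = ' ' then acc ++ ["&nbsp;".toList]
          else acc ++ [[ch]]) [])
      = l.flatMap pvEsc := by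
  have h : (l.foldl (fun acc ch =>
          if ch = '\n' then acc ++ ["</br>".toList]
          else if ch = ' ' then acc ++ ["&nbsp;".toList]
          else acc ++ [[ch]]) ([] : List (List Char)))
      = [] ++ l.map pvEsc := by
    rw [← PySem.List.foldl_append_singleton_eq_map]
    apply PySem.List.foldl_congr_mem
    intro acc c _
    unfold pvEsc
    split_ifs <;> rfl
  rw [h, List.nil_append, join_nil_sep]
  simp [List.flatMap_def]

-- ===== VERDICT (by name: the statement is the Claim_ definition above) =====
theorem text_divide_paragraph_spec : Claim_equal_text_divide_paragraph := by
  intro text _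
  unfold Spec_text_divide_paragraph
  rw [text_divide_paragraph, text_divide_paragraph_alt]
  split_ifs
  · rfl
  · rfl
  · rfl
  · show String.ofList ("<div class=\"markdown-body\">".toList
        ++ PySem.Chars.join "</br>".toList
            ((PySem.Chars.splitOn text.toList "\n".toList).map
              (fun l => PySem.Chars.replace l " ".toList "&nbsp;".toList))
        ++ "</div>".toList)
      = String.ofList ("<div class=\"markdown-body\">".toList
        ++ PySem.Chars.join []
            (text.toList.foldl (fun acc ch =>
              if ch = '\n' then acc ++ ["</br>".toList]
              else if ch = ' ' then acc ++ ["&nbsp;".toList]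
              else acc ++ [[ch]]) [])
        ++ "</div>".toList)
    rw [a_body_eq, b_body_eq]
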